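-- pv_equiv track=rewrite | github.com/haarishk1510-pixel/Compiler-Design | Compiler-Design-main/Computation of LEADING and TRAILING.py | compute_trailing
-- ===== SOURCE A (Python) =====
-- from collections import defaultdict
--
-- def compute_trailing(grammar):
--     trailing = defaultdict(set)
--
--     while True:
--         updated = False
--
--         for nt, prods in grammar.items():
--             for prod in prods:
--                 # Rule 1: A -> ...a (Terminal at end)
--                 if not prod[-1].isupper():
--                     if prod[-1] not in trailing[nt]:
--                         trailing[nt].add(prod[-1])
--                         updated = True
--                 else:
--                     # Rule 2: A -> ...B (Non-Terminal at end)
--                     # Add TRAILING(B) to TRAILING(A)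
--                     B = prod[-1]
--                     if not trailing[nt].issuperset(trailing[B]):
--                         trailing[nt].update(trailing[B])
--                         updated = True
--
--                     # Rule 3: A -> ...a B (Terminal before last NT)
--                     if len(prod) > 1 and not prod[-2].isupper():
--                         if prod[-2] not in trailing[nt]:
--                             trailing[nt].add(prod[-2])
--                             updated = True
--
--         if not updated:
--             break
--
--     return trailing
-- ===== SOURCE B (Python) =====
-- def compute_trailing(grammar):
--     from collections import defaultdict
--     trailing = defaultdict(set)
--     # Single parsing pass: seed base facts (end terminals, pre-terminals before a
--     # trailing nonterminal) and record the dependency edges TRAILING(b) -> TRAILING(a),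
--     # each with the size of TRAILING(b) already propagated along it.
--     edges = []
--     for nt, prods in grammar.items():
--         for prod in prods:
--             last = prod[-1]
--             if last.isupper():
--                 trailing[nt] |= trailing[last]
--                 if len(prod) > 1 and not prod[-2].isupper():
--                     trailing[nt].add(prod[-2])
--                 edges.append([nt, last, len(trailing[last])])
--             else:
--                 trailing[nt].add(last)
--     # Propagate along the dependency graph only: an edge whose source set has not
--     # grown since it was last propagated is skipped (semi-naive evaluation).
--     while True:
--         changed = False
--         for e in edges:
--             a, b, n = e
--             if len(trailing[b]) != n:
--                 before = len(trailing[a])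
--                 trailing[a] |= trailing[b]
--                 e[2] = len(trailing[b])
--                 if len(trailing[a]) != before:
--                     changed = True
--         if not changed:
--             return trailing
-- ===== Notes on version B (the rewrite author's own statement) =====
-- stated objective: alternative
-- what changed: B parses every production exactly once, seeding the base facts (end terminals and pre-terminals) and compiling the grammar into a dependency-edge list TRAILING(b)->TRAILING(a), then runs semi-naive propagation along those edges only, skipping any edge whose source set has not grown since it was last propagated, instead of A's re-parsing of all productions (indexing, isupper tests, membership/superset checks, Rules 1-3) on every fixed-point pass.
import Mathlib
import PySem

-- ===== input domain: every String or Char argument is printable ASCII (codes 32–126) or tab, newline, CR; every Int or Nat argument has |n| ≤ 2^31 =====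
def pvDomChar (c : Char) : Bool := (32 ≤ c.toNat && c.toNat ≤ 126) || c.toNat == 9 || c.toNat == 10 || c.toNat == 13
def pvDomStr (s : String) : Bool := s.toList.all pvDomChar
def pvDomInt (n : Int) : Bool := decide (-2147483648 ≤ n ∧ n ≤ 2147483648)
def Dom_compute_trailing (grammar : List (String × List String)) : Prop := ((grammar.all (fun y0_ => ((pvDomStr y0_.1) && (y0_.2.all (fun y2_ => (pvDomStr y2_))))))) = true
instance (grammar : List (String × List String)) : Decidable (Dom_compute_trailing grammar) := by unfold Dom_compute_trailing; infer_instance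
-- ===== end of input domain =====

-- B replaces A's repeated re-parsing of every production by one parsing pass that seeds the
-- base facts and compiles the nonterminal dependency edges, followed by semi-naive
-- propagation along those edges (edges whose source set has not grown are skipped)
-- (objective: alternative; same mutation order, so the same dict and set orders).

-- Fuel bound for the fixed-point loops of BOTH ports (a totality guard only: every iteration of
-- the Python loops except the last strictly grows some trailing set, which is bounded far below
-- this quantity, so the guard never fires on the Python's actual dynamics).
def pvFuel (grammar : List (String × List String)) : Nat :=
  let n := grammar.foldl (fun a p => p.2.foldl (fun a s => a + s.length) a) 0
  (grammar.length + n + 1) * (2 * n + 1) + 1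

-- ===== PORT A =====
-- one production's processing: Python's loop body over `prod`, state = (trailing, updated);
-- each defaultdict read `trailing[k]` is `setdefault k ∅` then `getD k ∅` (key creation on read)
def pvAProd (st : PySem.Dict String (PySem.Set String) × Bool) (nt : String) (prod : String) :
    PySem.Dict String (PySem.Set String) × Bool :=
  let d := st.1
  let u := st.2
  let c := PySem.List.pyGetD prod.toList (-1) ' '          -- prod[-1] (Pre_ excludes prod = "")
  if ¬ PySem.Chars.isupper c then
    -- Rule 1
    let d := d.setdefault nt PySem.Set.empty
    let s := d.getD nt PySem.Set.empty
    if PySem.Set.contains s (String.ofList [c]) then (d, u)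
    else (d.insert nt (PySem.Set.add s (String.ofList [c])), true)
  else
    -- Rule 2
    let b := String.ofList [c]
    let d := d.setdefault nt PySem.Set.empty
    let d := d.setdefault b PySem.Set.empty
    let sA := d.getD nt PySem.Set.empty
    let sB := d.getD b PySem.Set.empty
    let du : PySem.Dict String (PySem.Set String) × Bool :=
      if ¬ PySem.Set.issuperset sA sB then (d.insert nt (PySem.Set.update sA sB), true) else (d, u)
    -- Rule 3
    if 1 < prod.toList.length ∧ ¬ PySem.Chars.isupper (PySem.List.pyGetD prod.toList (-2) ' ') then
      let t := String.ofList [PySem.List.pyGetD prod.toList (-2) ' ']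
      let d2 := du.1.setdefault nt PySem.Set.empty
      let s := d2.getD nt PySem.Set.empty
      if PySem.Set.contains s t then (d2, du.2)
      else (d2.insert nt (PySem.Set.add s t), true)
    else du

-- the `while True:` loop: one full pass over grammar.items(), repeat while `updated`
def pvALoop (grammar : List (String × List String)) :
    Nat → PySem.Dict String (PySem.Set String) → PySem.Dict String (PySem.Set String)
  | 0, d => d
  | n + 1, d =>
    let st := grammar.foldl (fun st p => p.2.foldl (fun st prod => pvAProd st p.1 prod) st) (d, false)
    if st.2 then pvALoop grammar n st.1 else st.1

def compute_trailing (grammar : List (String × List String)) : List (String × List String) :=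
  (pvALoop grammar (pvFuel grammar + 1) PySem.Dict.empty).items

-- ===== PORT B =====
-- build pass, one production: seed base facts and record the dependency edge
-- [nt, b, len(trailing[b])]; state = (trailing, edges)
def pvBuildStep
    (st : PySem.Dict String (PySem.Set String) × List (String × String × Nat))
    (nt : String) (prod : String) :
    PySem.Dict String (PySem.Set String) × List (String × String × Nat) :=
  let d := st.1
  let c := PySem.List.pyGetD prod.toList (-1) ' '          -- prod[-1] (Pre_ excludes prod = "")
  if PySem.Chars.isupper c then
    let b := String.ofList [c]
    -- trailing[nt] |= trailing[last]  (defaultdict reads create both keys, nt first)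
    let d := (d.setdefault nt PySem.Set.empty).setdefault b PySem.Set.empty
    let d := d.insert nt (PySem.Set.update (d.getD nt PySem.Set.empty) (d.getD b PySem.Set.empty))
    -- trailing[nt].add(prod[-2]) when a terminal precedes the trailing nonterminal
    let d :=
      if 1 < prod.toList.length ∧ ¬ PySem.Chars.isupper (PySem.List.pyGetD prod.toList (-2) ' ')
      then d.insert nt (PySem.Set.add (d.getD nt PySem.Set.empty)
             (String.ofList [PySem.List.pyGetD prod.toList (-2) ' ']))
      else d
    (d, st.2 ++ [(nt, b, (d.getD b PySem.Set.empty).length)])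
  else
    let d := d.setdefault nt PySem.Set.empty
    (d.insert nt (PySem.Set.add (d.getD nt PySem.Set.empty) (String.ofList [c])), st.2)

-- one edge of the propagation pass; state = (trailing, rebuilt edge list, changed).
-- Keys a and b always exist here (both were created by the build pass and keys are never
-- removed), so the defaultdict reads are plain lookups.
def pvEStep (st : PySem.Dict String (PySem.Set String) × List (String × String × Nat) × Bool)
    (e : String × String × Nat) :
    PySem.Dict String (PySem.Set String) × List (String × String × Nat) × Bool :=
  let d := st.1
  if (d.getD e.2.1 PySem.Set.empty).length = e.2.2 then (d, st.2.1 ++ [e], st.2.2)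
  else
    let before := (d.getD e.1 PySem.Set.empty).length
    let d2 := d.insert e.1
      (PySem.Set.update (d.getD e.1 PySem.Set.empty) (d.getD e.2.1 PySem.Set.empty))
    (d2, st.2.1 ++ [(e.1, e.2.1, (d2.getD e.2.1 PySem.Set.empty).length)],
     st.2.2 || decide ((d2.getD e.1 PySem.Set.empty).length ≠ before))

-- the `while True:` propagation loop
def pvBLoop :
    Nat → List (String × String × Nat) → PySem.Dict String (PySem.Set String) →
    PySem.Dict String (PySem.Set String)
  | 0, _, d => d
  | n + 1, es, d =>
    let r := es.foldl pvEStep (d, [], false)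
    if r.2.2 then pvBLoop n r.2.1 r.1 else r.1

def compute_trailing_alt (grammar : List (String × List String)) : List (String × List String) :=
  let st := grammar.foldl
    (fun st p => p.2.foldl (fun st prod => pvBuildStep st p.1 prod) st) (PySem.Dict.empty, [])
  (pvBLoop (pvFuel grammar) st.2 st.1).items

-- ===== PRECONDITION & SPEC =====
-- Pre_ excludes grammars in which some production string has no characters; Python A raises IndexError at prod[-1] there.
def Pre_compute_trailing (grammar : List (String × List String)) : Prop :=
  ∀ p ∈ grammar, ∀ prod ∈ p.2, prod.length ≠ 0
instance (grammar : List (String × List String)) : Decidable (Pre_compute_trailing grammar) := by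
  unfold Pre_compute_trailing; infer_instance

def pvWitness_compute_trailing : (List (String × List String)) :=
  [("A", ["aB", "b"]), ("B", ["cA", "d"])]

def Spec_compute_trailing (grammar : List (String × List String)) (out : List (String × List String)) : Prop := out = compute_trailing_alt grammar
instance (grammar : List (String × List String)) (out : List (String × List String)) : Decidable (Spec_compute_trailing grammar out) := by unfold Spec_compute_trailing; infer_instance

-- ===== CLAIM (what is proved, stated in full; the proofs are below) =====
def Claim_equal_compute_trailing : Prop := ∀ (grammar : List (String × List String)), Dom_compute_trailing grammar → Pre_compute_trailing grammar → Spec_compute_trailing grammar (compute_trailing grammar)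

-- ===== LEMMAS AND PROOFS =====

-- the grammar flattened to (nonterminal, production) pairs
def pvFlat (grammar : List (String × List String)) : List (String × String) :=
  grammar.flatMap (fun p => p.2.map (fun prod => (p.1, prod)))

-- a nested fold over the grammar is a fold over the flattened pair list
theorem pv_foldl_flat {σ : Type} (F : σ → String → String → σ) :
    ∀ (g : List (String × List String)) (init : σ),
      g.foldl (fun st p => p.2.foldl (fun st prod => F st p.1 prod) st) init
        = (pvFlat g).foldl (fun st q => F st q.1 q.2) init := by
  intro g
  induction g with
  | nil => intro init; rfl
  | cons p t ih =>
    intro init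
    simp only [pvFlat, List.flatMap_cons, List.foldl_cons, List.foldl_append, List.foldl_map]
    exact ih _

-- entries of a dict with Nodup keys are determined by their key
theorem pv_key_unique {β : Type} :
    ∀ (l : List (String × β)), (l.map (fun p => p.1)).Nodup →
      ∀ p q : String × β, p ∈ l → q ∈ l → p.1 = q.1 → p = q := by
  intro l
  induction l with
  | nil => intro _ p q hp; simp at hp
  | cons a t ih =>
    intro hn p q hp hq hk
    simp only [List.map_cons, List.nodup_cons] at hn
    rcases List.mem_cons.mp hp with rfl | hp' <;> rcases List.mem_cons.mp hq with rfl | hq'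
    · rfl
    · exact absurd (hk ▸ List.mem_map_of_mem hq') hn.1
    · exact absurd (hk ▸ List.mem_map_of_mem hp') hn.1
    · exact ih hn.2 p q hp' hq' hk

-- a contained key reads back as `some` of its getD value
theorem pv_get?_of_contains (d : PySem.Dict String (PySem.Set String)) (k : String)
    (hc : d.contains k = true) :
    d.get? k = some (d.getD k PySem.Set.empty) := by
  have h := PySem.Dict.contains_eq_isSome_get? d k
  rw [hc] at h
  cases hv : d.get? k with
  | none => rw [hv] at h; simp at h
  | some v => rw [PySem.Dict.getD_eq_get?_getD, hv]; rfl

-- re-inserting the stored value leaves the dict unchanged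
theorem pv_insert_self (d : PySem.Dict String (PySem.Set String)) (k : String)
    (v : PySem.Set String) (hn : d.keys.Nodup) (h : d.get? k = some v) :
    d.insert k v = d := by
  have hc : d.contains k = true := by rw [PySem.Dict.contains_eq_isSome_get?, h]; rfl
  apply PySem.Dict.ext
  rw [PySem.Dict.items_insert_of_contains d v hc]
  have hkv : (k, v) ∈ d.items := (PySem.Dict.get?_eq_some_iff_mem_items d k v hn).mp h
  have hnk : (d.items.map (fun p => p.1)).Nodup := hn
  have hid : ∀ p ∈ d.items, (if (p.1 == k) = true then (k, v) else p) = id p := by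
    intro p hp
    by_cases hpk : (p.1 == k) = true
    · have hpe : p = (k, v) :=
        pv_key_unique d.items hnk p (k, v) hp hkv (by simpa using hpk)
      simp [hpe]
    · simp [hpk]
  rw [List.map_congr_left hid, List.map_id]

-- setdefault keeps keys Nodup
theorem pv_nodup_setdefault (d : PySem.Dict String (PySem.Set String)) (k : String)
    (v : PySem.Set String) (hn : d.keys.Nodup) : (d.setdefault k v).keys.Nodup := by
  cases hc : d.contains k with
  | true => rw [PySem.Dict.setdefault_of_contains d v hc]; exact hn
  | false => rw [PySem.Dict.setdefault_of_not_contains d v hc]; exact PySem.Dict.nodup_keys_insert d k v hn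

-- s.update(t) for a superset s is s itself
theorem pv_update_superset (s t : PySem.Set String) (h : PySem.Set.issuperset s t = true) :
    PySem.Set.update s t = s := by
  rw [PySem.Set.update_eq_append_filter]
  have hfil : List.filter (fun y => !PySem.Set.contains s y) (PySem.Set.ofList t) = [] := by
    rw [List.filter_eq_nil_iff]
    intro y hy
    have hmem : y ∈ s := (PySem.Set.issuperset_iff s t).mp h y ((PySem.Set.mem_ofList t y).mp hy)
    simp [hmem]
  rw [hfil, List.append_nil]

-- s.update(t) for a non-superset s is strictly longer than s
theorem pv_update_not_superset (s t : PySem.Set String) (h : PySem.Set.issuperset s t = false) :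
    s.length < (PySem.Set.update s t).length := by
  rw [PySem.Set.update_eq_append_filter, List.length_append]
  have : ∃ x ∈ t, x ∉ s := by
    by_contra hc
    push Not at hc
    rw [(PySem.Set.issuperset_iff s t).mpr hc] at h
    simp at h
  rcases this with ⟨x, hxt, hxs⟩
  have hmem : x ∈ List.filter (fun y => !PySem.Set.contains s y) (PySem.Set.ofList t) := by
    rw [List.mem_filter]
    refine ⟨(PySem.Set.mem_ofList t x).mpr hxt, ?_⟩
    simp only [Bool.not_eq_true']
    cases hcx : PySem.Set.contains s x with
    | false => rfl
    | true => exact absurd ((PySem.Set.contains_iff s x).mp hcx) hxs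
  have := List.length_pos_of_mem hmem
  omega

-- the dict grew: keys persist and every stored set is extended at the end
def pvGrow (d d' : PySem.Dict String (PySem.Set String)) : Prop :=
  (∀ k, d.contains k = true → d'.contains k = true) ∧
  ∀ k, (d.getD k PySem.Set.empty) <+: (d'.getD k PySem.Set.empty)

theorem pvGrow_refl (d : PySem.Dict String (PySem.Set String)) : pvGrow d d :=
  ⟨fun _ h => h, fun _ => List.prefix_refl _⟩

theorem pvGrow_trans {d e f : PySem.Dict String (PySem.Set String)}
    (h1 : pvGrow d e) (h2 : pvGrow e f) : pvGrow d f :=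
  ⟨fun k hk => h2.1 k (h1.1 k hk), fun k => (h1.2 k).trans (h2.2 k)⟩

theorem pvGrow_setdefault (d : PySem.Dict String (PySem.Set String)) (k : String) :
    pvGrow d (d.setdefault k PySem.Set.empty) := by
  cases hc : d.contains k with
  | true => rw [PySem.Dict.setdefault_of_contains d _ hc]; exact pvGrow_refl d
  | false =>
    rw [PySem.Dict.setdefault_of_not_contains d _ hc]
    constructor
    · intro k' hk'; rw [PySem.Dict.contains_insert]; simp [hk']
    · intro k'
      rw [PySem.Dict.getD_insert]
      split_ifs with he
      · subst he; rw [PySem.Dict.getD_of_not_contains d PySem.Set.empty hc]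
      · exact List.prefix_refl _

theorem pvGrow_insert (d : PySem.Dict String (PySem.Set String)) (k : String)
    (v : PySem.Set String) (h : (d.getD k PySem.Set.empty) <+: v) :
    pvGrow d (d.insert k v) := by
  constructor
  · intro k' hk'; rw [PySem.Dict.contains_insert]; simp [hk']
  · intro k'
    rw [PySem.Dict.getD_insert]
    split_ifs with he
    · subst he; exact h
    · exact List.prefix_refl _

theorem pv_prefix_add (s : PySem.Set String) (x : String) : s <+: PySem.Set.add s x := by
  rw [PySem.Set.add_eq_ite]
  split_ifs
  · exact List.prefix_refl _
  · exact List.prefix_append _ _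

theorem pv_prefix_update (s t : PySem.Set String) : s <+: PySem.Set.update s t := by
  rw [PySem.Set.update_eq_append_filter]; exact List.prefix_append _ _

-- getD is unchanged by a defaultdict read (setdefault with the default value)
theorem pv_getD_setdefault (d : PySem.Dict String (PySem.Set String)) (j k : String) :
    (d.setdefault j PySem.Set.empty).getD k PySem.Set.empty = d.getD k PySem.Set.empty := by
  cases hc : d.contains j with
  | true => rw [PySem.Dict.setdefault_of_contains d _ hc]
  | false =>
    rw [PySem.Dict.setdefault_of_not_contains d _ hc, PySem.Dict.getD_insert]
    split_ifs with he
    · subst he; rw [PySem.Dict.getD_of_not_contains d PySem.Set.empty hc]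
    · rfl

-- per-production residual facts the build pass leaves behind (what A's Rules 1 and 3
-- re-check, always succeeding, on every later pass)
def pvRInv1 (nt prod : String) (d : PySem.Dict String (PySem.Set String)) : Prop :=
  d.contains nt = true ∧
  (if PySem.Chars.isupper (PySem.List.pyGetD prod.toList (-1) ' ') then
      d.contains (String.ofList [PySem.List.pyGetD prod.toList (-1) ' ']) = true ∧
      ((1 < prod.toList.length ∧ ¬ PySem.Chars.isupper (PySem.List.pyGetD prod.toList (-2) ' ')) →
        String.ofList [PySem.List.pyGetD prod.toList (-2) ' '] ∈ d.getD nt PySem.Set.empty)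
    else String.ofList [PySem.List.pyGetD prod.toList (-1) ' '] ∈ d.getD nt PySem.Set.empty)

def pvRInv (F : List (String × String)) (d : PySem.Dict String (PySem.Set String)) : Prop :=
  ∀ q ∈ F, pvRInv1 q.1 q.2 d

-- per-edge fact: the recorded size never exceeds the source set's size, and when they are
-- equal everything in the source set has already been propagated into the target set
def pvEInv1 (d : PySem.Dict String (PySem.Set String)) (e : String × String × Nat) : Prop :=
  d.contains e.1 = true ∧ d.contains e.2.1 = true ∧
  e.2.2 ≤ (d.getD e.2.1 PySem.Set.empty).length ∧
  (e.2.2 = (d.getD e.2.1 PySem.Set.empty).length →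
    ∀ x ∈ d.getD e.2.1 PySem.Set.empty, x ∈ d.getD e.1 PySem.Set.empty)

def pvEInv (d : PySem.Dict String (PySem.Set String)) (es : List (String × String × Nat)) : Prop :=
  ∀ e ∈ es, pvEInv1 d e

-- the edge list is the upper-ending productions in order (with some recorded sizes)
def pvMatch : List (String × String) → List (String × String × Nat) → Prop
  | [], es => es = []
  | q :: R, es =>
    if PySem.Chars.isupper (PySem.List.pyGetD q.2.toList (-1) ' ') then
      ∃ n es', es = (q.1, String.ofList [PySem.List.pyGetD q.2.toList (-1) ' '], n) :: es' ∧
        pvMatch R es'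
    else pvMatch R es

theorem pvRInv1_grow {nt prod : String} {d d' : PySem.Dict String (PySem.Set String)}
    (h : pvRInv1 nt prod d) (hg : pvGrow d d') : pvRInv1 nt prod d' := by
  unfold pvRInv1 at h ⊢
  refine ⟨hg.1 _ h.1, ?_⟩
  split_ifs at h ⊢ with hu
  · exact ⟨hg.1 _ h.2.1, fun hp => (hg.2 nt).subset (h.2.2 hp)⟩
  · exact (hg.2 nt).subset h.2

theorem pvRInv_grow {F : List (String × String)} {d d' : PySem.Dict String (PySem.Set String)}
    (h : pvRInv F d) (hg : pvGrow d d') : pvRInv F d' :=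
  fun q hq => pvRInv1_grow (h q hq) hg

theorem pvEInv1_grow {d d' : PySem.Dict String (PySem.Set String)} {e : String × String × Nat}
    (h : pvEInv1 d e) (hg : pvGrow d d') : pvEInv1 d' e := by
  obtain ⟨h1, h2, h3, h4⟩ := h
  have hpre := hg.2 e.2.1
  have hlen := hpre.length_le
  refine ⟨hg.1 _ h1, hg.1 _ h2, by omega, ?_⟩
  intro heq x hx
  have heq' : (d.getD e.2.1 PySem.Set.empty).length = (d'.getD e.2.1 PySem.Set.empty).length := by
    omega
  have hsame : d.getD e.2.1 PySem.Set.empty = d'.getD e.2.1 PySem.Set.empty :=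
    hpre.eq_of_length heq'
  exact (hg.2 e.1).subset (h4 (by omega) x (hsame ▸ hx))

theorem pvEInv_grow {d d' : PySem.Dict String (PySem.Set String)} {es : List (String × String × Nat)}
    (h : pvEInv d es) (hg : pvGrow d d') : pvEInv d' es :=
  fun e he => pvEInv1_grow (h e he) hg

-- membership transfers into an updated set
theorem pv_mem_update_left {s t : PySem.Set String} {x : String} (h : x ∈ s) :
    x ∈ PySem.Set.update s t := (PySem.Set.mem_update _ _ _).mpr (Or.inl h)

theorem pv_mem_update_right {s t : PySem.Set String} {x : String} (h : x ∈ t) :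
    x ∈ PySem.Set.update s t := (PySem.Set.mem_update _ _ _).mpr (Or.inr h)

-- ===== build pass: one production =====
theorem pv_build_step (d : PySem.Dict String (PySem.Set String))
    (es : List (String × String × Nat)) (u : Bool) (nt prod : String) (hn : d.keys.Nodup) :
    (pvAProd (d, u) nt prod).1 = (pvBuildStep (d, es) nt prod).1
  ∧ (pvBuildStep (d, es) nt prod).1.keys.Nodup
  ∧ pvGrow d (pvBuildStep (d, es) nt prod).1
  ∧ pvRInv1 nt prod (pvBuildStep (d, es) nt prod).1
  ∧ ∃ eN, (pvBuildStep (d, es) nt prod).2 = es ++ eN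
      ∧ pvMatch [(nt, prod)] eN
      ∧ pvEInv (pvBuildStep (d, es) nt prod).1 eN := by
  by_cases hup : PySem.Chars.isupper (PySem.List.pyGetD prod.toList (-1) ' ') = true
  · -- upper: Rules 2 and 3
    set c := PySem.List.pyGetD prod.toList (-1) ' ' with hc
    set b := String.ofList [c] with hb
    set d1 := (d.setdefault nt PySem.Set.empty).setdefault b PySem.Set.empty with hd1
    have hn1 : d1.keys.Nodup := pv_nodup_setdefault _ b _ (pv_nodup_setdefault d nt _ hn)
    have hg1 : pvGrow d d1 := pvGrow_trans (pvGrow_setdefault d nt) (pvGrow_setdefault _ b)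
    have hcnt : d1.contains nt = true := by
      rw [hd1, PySem.Dict.contains_setdefault, PySem.Dict.contains_setdefault]; simp
    have hcb : d1.contains b = true := by
      rw [hd1, PySem.Dict.contains_setdefault]; simp
    set sA := d1.getD nt PySem.Set.empty with hsA
    set sB := d1.getD b PySem.Set.empty with hsB
    set d3 := d1.insert nt (PySem.Set.update sA sB) with hd3
    have hn3 : d3.keys.Nodup := PySem.Dict.nodup_keys_insert _ nt _ hn1
    have hg3 : pvGrow d1 d3 := pvGrow_insert d1 nt _ (pv_prefix_update sA sB)
    have hcnt3 : d3.contains nt = true := by rw [hd3, PySem.Dict.contains_insert]; simp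
    have hcb3 : d3.contains b = true := hg3.1 b hcb
    have hgetnt3 : d3.getD nt PySem.Set.empty = PySem.Set.update sA sB := by
      rw [hd3, PySem.Dict.getD_insert_self]
    -- A's Rule 2 state equals d3 (when s is a superset, the re-inserted value is unchanged)
    have hdu : (if ¬ PySem.Set.issuperset sA sB then (d1.insert nt (PySem.Set.update sA sB), true)
        else (d1, u)).1 = d3 := by
      split_ifs with hsup
      · rw [hd3, pv_update_superset sA sB hsup, hsA]
        exact (pv_insert_self d1 nt _ hn1 (pv_get?_of_contains d1 nt hcnt)).symm
      · rfl
    -- final dict after the (optional) Rule 3 / pre-terminal addition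
    by_cases hP : (1 < prod.toList.length ∧
        ¬ PySem.Chars.isupper (PySem.List.pyGetD prod.toList (-2) ' ') = true)
    · set t := String.ofList [PySem.List.pyGetD prod.toList (-2) ' '] with ht
      set d4 := d3.insert nt (PySem.Set.add (d3.getD nt PySem.Set.empty) t) with hd4
      have hn4 : d4.keys.Nodup := PySem.Dict.nodup_keys_insert _ nt _ hn3
      have hg4 : pvGrow d3 d4 := pvGrow_insert d3 nt _ (pv_prefix_add _ t)
      have hBres : pvBuildStep (d, es) nt prod
          = (d4, es ++ [(nt, b, (d4.getD b PySem.Set.empty).length)]) := by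
        rw [pvBuildStep]
        simp only [← hc, ← hb, ← hd1, ← hsA, ← hsB, ← hd3, ← ht]
        rw [if_pos hup, if_pos hP]
      have hAres : (pvAProd (d, u) nt prod).1 = d4 := by
        rw [pvAProd]
        simp only [← hc, ← hb, ← hd1, ← hsA, ← hsB]
        rw [if_neg (by simp [hup]), if_pos hP]
        simp only [← ht, hdu]
        have hsd : d3.setdefault nt PySem.Set.empty = d3 :=
          PySem.Dict.setdefault_of_contains d3 _ hcnt3
        rw [hsd]
        by_cases hmem : PySem.Set.contains (d3.getD nt PySem.Set.empty) t = true
        · -- the element is already present: the add and re-insert change nothing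
          rw [if_pos hmem]
          show d3 = d4
          rw [hd4, PySem.Set.add_of_mem ((PySem.Set.contains_iff _ _).mp hmem)]
          exact (pv_insert_self d3 nt _ hn3 (pv_get?_of_contains d3 nt hcnt3)).symm
        · rw [if_neg hmem]
      have hgnt4 : ∀ x ∈ d4.getD b PySem.Set.empty, x ∈ d4.getD nt PySem.Set.empty := by
        intro x hx
        by_cases hbe : b = nt
        · rw [hbe] at hx; exact hx
        · have h43 : d4.getD b PySem.Set.empty = d3.getD b PySem.Set.empty := by
            rw [hd4, PySem.Dict.getD_insert]; exact if_neg hbe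
          have h31 : d3.getD b PySem.Set.empty = sB := by
            rw [hd3, PySem.Dict.getD_insert]; exact if_neg hbe
          have hxb1 : x ∈ sB := by rw [← h31, ← h43]; exact hx
          have hx3 : x ∈ d3.getD nt PySem.Set.empty := by
            rw [hgetnt3]; exact pv_mem_update_right hxb1
          exact (hg4.2 nt).subset hx3
      rw [hBres]
      refine ⟨hAres, hn4, pvGrow_trans hg1 (pvGrow_trans hg3 hg4), ?_, ?_⟩
      · refine ⟨(pvGrow_trans hg3 hg4).1 nt hcnt, ?_⟩
        rw [if_pos hup]
        refine ⟨(pvGrow_trans hg3 hg4).1 b hcb, fun _ => ?_⟩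
        rw [hd4, PySem.Dict.getD_insert_self, ← ht]
        rw [PySem.Set.add_eq_ite]
        split_ifs with hmem
        · exact hmem
        · exact List.mem_append_right _ (List.mem_singleton_self t)
      · refine ⟨[(nt, b, (d4.getD b PySem.Set.empty).length)], rfl, ?_, ?_⟩
        · rw [pvMatch, if_pos hup]
          exact ⟨_, [], rfl, rfl⟩
        · intro e he
          simp only [List.mem_singleton] at he
          subst he
          exact ⟨(pvGrow_trans hg3 hg4).1 nt hcnt, (pvGrow_trans hg3 hg4).1 b hcb,
            Nat.le_refl _, fun _ => hgnt4⟩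
    · -- no pre-terminal
      have hBres : pvBuildStep (d, es) nt prod
          = (d3, es ++ [(nt, b, (d3.getD b PySem.Set.empty).length)]) := by
        rw [pvBuildStep]
        simp only [← hc, ← hb, ← hd1, ← hsA, ← hsB, ← hd3]
        rw [if_pos hup, if_neg hP]
      have hAres : (pvAProd (d, u) nt prod).1 = d3 := by
        rw [pvAProd]
        simp only [← hc, ← hb, ← hd1, ← hsA, ← hsB]
        rw [if_neg (by simp [hup]), if_neg hP]
        exact hdu
      rw [hBres]
      have hgnt3 : ∀ x ∈ d3.getD b PySem.Set.empty, x ∈ d3.getD nt PySem.Set.empty := by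
        intro x hx
        by_cases hbe : b = nt
        · rw [hbe] at hx; exact hx
        · have hxb1 : x ∈ sB := by
            rw [hsB]
            have : d1.getD b PySem.Set.empty = d3.getD b PySem.Set.empty := by
              rw [hd3, PySem.Dict.getD_insert, if_neg hbe]
            rw [this]; exact hx
          rw [hgetnt3]; exact pv_mem_update_right hxb1
      refine ⟨by rw [hAres], hn3, pvGrow_trans hg1 hg3, ?_, ?_⟩
      · refine ⟨hcnt3, ?_⟩
        rw [if_pos hup]
        exact ⟨hcb3, fun hp => absurd hp hP⟩
      · refine ⟨[(nt, b, (d3.getD b PySem.Set.empty).length)], rfl, ?_, ?_⟩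
        · rw [pvMatch, if_pos hup]
          exact ⟨_, [], rfl, rfl⟩
        · intro e he
          simp only [List.mem_singleton] at he
          subst he
          exact ⟨hcnt3, hcb3, Nat.le_refl _, fun _ => hgnt3⟩
  · -- terminal at the end: Rule 1
    set c := PySem.List.pyGetD prod.toList (-1) ' ' with hc
    set cs := String.ofList [c] with hcs
    set d1 := d.setdefault nt PySem.Set.empty with hd1
    have hn1 : d1.keys.Nodup := pv_nodup_setdefault d nt _ hn
    have hg1 : pvGrow d d1 := pvGrow_setdefault d nt
    have hcnt : d1.contains nt = true := by
      rw [hd1, PySem.Dict.contains_setdefault]; simp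
    set d2 := d1.insert nt (PySem.Set.add (d1.getD nt PySem.Set.empty) cs) with hd2
    have hBres : pvBuildStep (d, es) nt prod = (d2, es) := by
      rw [pvBuildStep]
      simp only [← hc, ← hcs, ← hd1, ← hd2]
      rw [if_neg hup]
    have hAres : (pvAProd (d, u) nt prod).1 = d2 := by
      rw [pvAProd]
      simp only [← hc, ← hcs, ← hd1]
      rw [if_pos (by simp [hup])]
      split_ifs with hmem
      · rw [hd2, PySem.Set.add_of_mem ((PySem.Set.contains_iff _ _).mp hmem)]
        exact (pv_insert_self d1 nt _ hn1 (pv_get?_of_contains d1 nt hcnt)).symm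
      · rfl
    rw [hBres]
    refine ⟨hAres, PySem.Dict.nodup_keys_insert _ nt _ hn1,
      pvGrow_trans hg1 (pvGrow_insert d1 nt _ (pv_prefix_add _ cs)), ?_, [], by simp, ?_, ?_⟩
    · refine ⟨by rw [hd2, PySem.Dict.contains_insert]; simp, ?_⟩
      rw [if_neg hup]
      rw [hd2, PySem.Dict.getD_insert_self, PySem.Set.add_eq_ite]
      split_ifs with hmem
      · exact hmem
      · exact List.mem_append_right _ (List.mem_singleton_self cs)
    · rw [pvMatch, if_neg hup]; rfl
    · intro e he; simp at he

-- ===== build pass: the whole flattened grammar =====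
theorem pv_build_fold :
    ∀ (F : List (String × String)) (d : PySem.Dict String (PySem.Set String))
      (es : List (String × String × Nat)) (u : Bool),
      d.keys.Nodup → pvEInv d es →
      (F.foldl (fun st q => pvAProd st q.1 q.2) (d, u)).1
        = (F.foldl (fun st q => pvBuildStep st q.1 q.2) (d, es)).1
      ∧ (F.foldl (fun st q => pvBuildStep st q.1 q.2) (d, es)).1.keys.Nodup
      ∧ pvGrow d (F.foldl (fun st q => pvBuildStep st q.1 q.2) (d, es)).1
      ∧ pvRInv F (F.foldl (fun st q => pvBuildStep st q.1 q.2) (d, es)).1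
      ∧ ∃ esN, (F.foldl (fun st q => pvBuildStep st q.1 q.2) (d, es)).2 = es ++ esN
          ∧ pvMatch F esN
          ∧ pvEInv (F.foldl (fun st q => pvBuildStep st q.1 q.2) (d, es)).1 esN := by
  intro F
  induction F with
  | nil =>
    intro d es u hn hE
    exact ⟨rfl, hn, pvGrow_refl d, fun q hq => absurd hq (List.not_mem_nil),
      ⟨[], by simp, rfl, fun e he => absurd he (List.not_mem_nil)⟩⟩
  | cons q R ih =>
    intro d es u hn hE
    obtain ⟨heq, hn1, hg1, hR1, eN, heN, hM1, hE1⟩ := pv_build_step d es u q.1 q.2 hn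
    simp only [List.foldl_cons]
    set stB := pvBuildStep (d, es) q.1 q.2 with hstB
    have hstA : pvAProd (d, u) q.1 q.2 = (stB.1, (pvAProd (d, u) q.1 q.2).2) := by
      exact Prod.ext heq rfl
    rw [hstA]
    have hEall : pvEInv stB.1 (es ++ eN) := by
      intro e he
      rcases List.mem_append.mp he with h | h
      · exact pvEInv1_grow (hE e h) hg1
      · exact hE1 e h
    have hstB2 : stB = (stB.1, es ++ eN) := Prod.ext rfl heN
    rw [hstB2]
    obtain ⟨heq', hn', hg', hR', esN', heN', hM', hE'⟩ :=
      ih stB.1 (es ++ eN) (pvAProd (d, u) q.1 q.2).2 hn1 hEall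
    refine ⟨heq', hn', pvGrow_trans hg1 hg', ?_, eN ++ esN', by rw [heN']; simp, ?_, ?_⟩
    · intro p hp
      rcases List.mem_cons.mp hp with h | h
      · subst h; exact pvRInv1_grow hR1 hg'
      · exact hR' p h
    · -- pvMatch (q :: R) (eN ++ esN')
      rw [pvMatch]
      rw [pvMatch] at hM1
      split_ifs with hu
      · rw [if_pos hu] at hM1
        obtain ⟨n, es0, he0, hes0⟩ := hM1
        rw [pvMatch] at hes0
        subst hes0
        exact ⟨n, esN', by rw [he0]; simp, hM'⟩
      · rw [if_neg hu] at hM1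
        rw [pvMatch] at hM1
        subst hM1
        simpa using hM'
    · intro e he
      rcases List.mem_append.mp he with h | h
      · exact pvEInv1_grow (hE1 e h) hg'
      · exact hE' e h

-- ===== one propagation pass equals one full pass of A (on states the build pass produced) =====
theorem pv_pass :
    ∀ (F : List (String × String)) (es : List (String × String × Nat))
      (d : PySem.Dict String (PySem.Set String)) (u : Bool) (acc : List (String × String × Nat)),
      d.keys.Nodup → pvRInv F d → pvEInv d es → pvMatch F es →
      ∃ esN,
        es.foldl pvEStep (d, acc, u)
          = ((F.foldl (fun st q => pvAProd st q.1 q.2) (d, u)).1, acc ++ esN,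
             (F.foldl (fun st q => pvAProd st q.1 q.2) (d, u)).2)
        ∧ pvMatch F esN
        ∧ pvGrow d (F.foldl (fun st q => pvAProd st q.1 q.2) (d, u)).1
        ∧ (F.foldl (fun st q => pvAProd st q.1 q.2) (d, u)).1.keys.Nodup
        ∧ pvEInv (F.foldl (fun st q => pvAProd st q.1 q.2) (d, u)).1 esN := by
  intro F
  induction F with
  | nil =>
    intro es d u acc hn hR hE hM
    rw [pvMatch] at hM
    subst hM
    exact ⟨[], by simp, rfl, pvGrow_refl d, hn, fun e he => absurd he List.not_mem_nil⟩
  | cons q R ih =>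
    intro es d u acc hn hR hE hM
    have hR1 : pvRInv1 q.1 q.2 d := hR q List.mem_cons_self
    have hRrest : pvRInv R d := fun p hp => hR p (List.mem_cons_of_mem q hp)
    rw [pvMatch] at hM
    have hcnt : d.contains q.1 = true := hR1.1
    by_cases hup : PySem.Chars.isupper (PySem.List.pyGetD q.2.toList (-1) ' ') = true
    · -- production ends in a nonterminal: the matching edge
      rw [if_pos hup] at hM
      obtain ⟨n, es', hes, hM'⟩ := hM
      subst hes
      set c := PySem.List.pyGetD q.2.toList (-1) ' ' with hc
      set b := String.ofList [c] with hb
      have hR1' : d.contains b = true ∧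
          ((1 < q.2.toList.length ∧ ¬ PySem.Chars.isupper (PySem.List.pyGetD q.2.toList (-2) ' ')) →
            String.ofList [PySem.List.pyGetD q.2.toList (-2) ' '] ∈ d.getD q.1 PySem.Set.empty) := by
        have h2 := hR1.2
        rw [pvRInv1] at hR1
        rw [if_pos hup] at h2
        exact h2
      have hcb : d.contains b = true := hR1'.1
      have hE1 : pvEInv1 d (q.1, b, n) := hE _ List.mem_cons_self
      have hErest : pvEInv d es' := fun e he => hE e (List.mem_cons_of_mem _ he)
      set sA := d.getD q.1 PySem.Set.empty with hsA
      set sB := d.getD b PySem.Set.empty with hsB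
      by_cases hskip : sB.length = n
      · -- the source set has not grown since this edge was last propagated: skip, and
        -- A's Rules 2 and 3 are no-ops here too
        have hsub : PySem.Set.issuperset sA sB = true := by
          rw [PySem.Set.issuperset_iff]
          exact hE1.2.2.2 hskip.symm
        have hBstep : pvEStep (d, acc, u) (q.1, b, n) = (d, acc ++ [(q.1, b, n)], u) := by
          rw [pvEStep]
          simp only [← hsB]
          rw [if_pos hskip]
        have hdu : (if ¬ PySem.Set.issuperset sA sB = true
            then (d.insert q.1 (PySem.Set.update sA sB), true) else (d, u)) = (d, u) :=
          if_neg (by simp [hsub])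
        have hAstep : pvAProd (d, u) q.1 q.2 = (d, u) := by
          rw [pvAProd]
          simp only [← hc, ← hb]
          rw [if_neg (by simp [hup])]
          rw [PySem.Dict.setdefault_of_contains d _ hcnt, PySem.Dict.setdefault_of_contains d _ hcb]
          simp only [← hsA, ← hsB]
          by_cases hP : (1 < q.2.toList.length ∧
              ¬ PySem.Chars.isupper (PySem.List.pyGetD q.2.toList (-2) ' ') = true)
          · rw [if_pos hP]
            simp only [hdu]
            rw [PySem.Dict.setdefault_of_contains d _ hcnt,
              if_pos ((PySem.Set.contains_iff _ _).mpr (hR1'.2 hP))]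
          · rw [if_neg hP]
            exact hdu
        obtain ⟨esN', heq, hM'', hg, hn', hE'⟩ := ih es' d u (acc ++ [(q.1, b, n)]) hn hRrest hErest hM'
        refine ⟨(q.1, b, n) :: esN', ?_, ?_, ?_, ?_, ?_⟩
        · simp only [List.foldl_cons, hBstep, hAstep, heq]
          simp
        · rw [pvMatch]
          simp only [← hc, ← hb]
          rw [if_pos hup]
          exact ⟨n, esN', rfl, hM''⟩
        · simp only [List.foldl_cons, hAstep]; exact hg
        · simp only [List.foldl_cons, hAstep]; exact hn'
        · simp only [List.foldl_cons, hAstep]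
          intro e he
          rcases List.mem_cons.mp he with h | h
          · subst h; exact pvEInv1_grow hE1 hg
          · exact hE' e h
      · -- the source set grew: propagate (A's Rule 2 union with its flag, Rule 3 a no-op)
        set d2 := d.insert q.1 (PySem.Set.update sA sB) with hd2
        set n' := (d2.getD b PySem.Set.empty).length with hn'def
        set flag := (u || decide ((d2.getD q.1 PySem.Set.empty).length ≠ sA.length)) with hflag
        have hn2 : d2.keys.Nodup := PySem.Dict.nodup_keys_insert _ _ _ hn
        have hg2 : pvGrow d d2 := pvGrow_insert d q.1 _ (pv_prefix_update sA sB)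
        have hd2nt : d2.getD q.1 PySem.Set.empty = PySem.Set.update sA sB := by
          rw [hd2, PySem.Dict.getD_insert_self]
        have hcnt2 : d2.contains q.1 = true := hg2.1 _ hcnt
        have hcb2 : d2.contains b = true := hg2.1 _ hcb
        have hBstep : pvEStep (d, acc, u) (q.1, b, n) = (d2, acc ++ [(q.1, b, n')], flag) := by
          rw [pvEStep]
          simp only [← hsA, ← hsB, ← hd2, ← hn'def, ← hflag]
          rw [if_neg hskip]
        have hAstep : pvAProd (d, u) q.1 q.2 = (d2, flag) := by
          rw [pvAProd]
          simp only [← hc, ← hb]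
          rw [if_neg (by simp [hup])]
          rw [PySem.Dict.setdefault_of_contains d _ hcnt, PySem.Dict.setdefault_of_contains d _ hcb]
          simp only [← hsA, ← hsB]
          by_cases hsup : PySem.Set.issuperset sA sB = true
          · -- union adds nothing: A leaves the dict and flag; B re-inserts the same set
            have hupd : PySem.Set.update sA sB = sA := pv_update_superset sA sB hsup
            have hd2d : d2 = d := by
              rw [hd2, hupd, hsA]
              exact pv_insert_self d q.1 _ hn (pv_get?_of_contains d q.1 hcnt)
            have hfl : flag = u := by
              rw [hflag, hd2nt, hupd]
              simp
            have hdu : (if ¬ PySem.Set.issuperset sA sB = true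
                then (d.insert q.1 (PySem.Set.update sA sB), true) else (d, u)) = (d, u) :=
              if_neg (by simp [hsup])
            by_cases hP : (1 < q.2.toList.length ∧
                ¬ PySem.Chars.isupper (PySem.List.pyGetD q.2.toList (-2) ' ') = true)
            · rw [if_pos hP]
              simp only [hdu]
              rw [PySem.Dict.setdefault_of_contains d _ hcnt,
                if_pos ((PySem.Set.contains_iff _ _).mpr (hR1'.2 hP))]
              rw [hd2d, hfl]
            · rw [if_neg hP, hdu, hd2d, hfl]
          · -- union grows the target: both set the flag
            have hsup' : PySem.Set.issuperset sA sB = false := by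
              cases h : PySem.Set.issuperset sA sB
              · rfl
              · exact absurd h hsup
            have hlt := pv_update_not_superset sA sB hsup'
            have hfl : flag = true := by
              rw [hflag, hd2nt]
              have : (PySem.Set.update sA sB).length ≠ sA.length := by omega
              simp [this]
            have hdu : (if ¬ PySem.Set.issuperset sA sB = true
                then (d.insert q.1 (PySem.Set.update sA sB), true) else (d, u)) = (d2, true) := by
              rw [if_pos (by simp [hsup'])]
            by_cases hP : (1 < q.2.toList.length ∧
                ¬ PySem.Chars.isupper (PySem.List.pyGetD q.2.toList (-2) ' ') = true)
            · have hmem2 : PySem.Set.contains (d2.getD q.1 PySem.Set.empty)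
                  (String.ofList [PySem.List.pyGetD q.2.toList (-2) ' ']) = true := by
                rw [PySem.Set.contains_iff, hd2nt]
                exact pv_mem_update_left (hR1'.2 hP)
              rw [if_pos hP]
              simp only [hdu]
              rw [PySem.Dict.setdefault_of_contains d2 _ hcnt2, if_pos hmem2, hfl]
            · rw [if_neg hP, hdu, hfl]
        have hE2 : pvEInv1 d2 (q.1, b, n') := by
          refine ⟨hcnt2, hcb2, Nat.le_refl _, fun _ => ?_⟩
          intro x hx
          by_cases hbe : b = q.1
          · rw [hbe] at hx; exact hx
          · have hb2 : d2.getD b PySem.Set.empty = sB := by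
              rw [hd2, PySem.Dict.getD_insert]
              rw [if_neg hbe]
            rw [hb2] at hx
            rw [hd2nt]
            exact pv_mem_update_right hx
        obtain ⟨esN', heq, hM'', hg, hn'', hE'⟩ :=
          ih es' d2 flag (acc ++ [(q.1, b, n')]) hn2 (pvRInv_grow hRrest hg2)
            (pvEInv_grow hErest hg2) hM'
        refine ⟨(q.1, b, n') :: esN', ?_, ?_, ?_, ?_, ?_⟩
        · simp only [List.foldl_cons, hBstep, hAstep, heq]
          simp
        · rw [pvMatch]
          simp only [← hc, ← hb]
          rw [if_pos hup]
          exact ⟨n', esN', rfl, hM''⟩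
        · simp only [List.foldl_cons, hAstep]; exact pvGrow_trans hg2 hg
        · simp only [List.foldl_cons, hAstep]; exact hn''
        · simp only [List.foldl_cons, hAstep]
          intro e he
          rcases List.mem_cons.mp he with h | h
          · subst h; exact pvEInv1_grow hE2 hg
          · exact hE' e h
    · -- production ends in a terminal: A's Rule 1 is a no-op, B has no edge for it
      rw [if_neg hup] at hM
      have hmem : String.ofList [PySem.List.pyGetD q.2.toList (-1) ' ']
          ∈ d.getD q.1 PySem.Set.empty := by
        have h2 := hR1.2
        rw [if_neg hup] at h2
        exact h2
      have hAstep : pvAProd (d, u) q.1 q.2 = (d, u) := by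
        rw [pvAProd]
        rw [if_pos (by simp [hup])]
        rw [PySem.Dict.setdefault_of_contains d _ hcnt]
        rw [if_pos ((PySem.Set.contains_iff _ _).mpr hmem)]
      obtain ⟨esN, heq, hM'', hg, hn', hE'⟩ := ih es d u acc hn hRrest hE hM
      refine ⟨esN, ?_, ?_, ?_, ?_, ?_⟩
      · simp only [List.foldl_cons, hAstep]; exact heq
      · rw [pvMatch]
        rw [if_neg hup]
        exact hM''
      · simp only [List.foldl_cons, hAstep]; exact hg
      · simp only [List.foldl_cons, hAstep]; exact hn'
      · simp only [List.foldl_cons, hAstep]; exact hE'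

-- ===== flag bookkeeping of A's pass =====
-- once `updated` is True it stays True
theorem pv_flag_mono (d : PySem.Dict String (PySem.Set String)) (nt prod : String) :
    (pvAProd (d, true) nt prod).2 = true := by
  simp only [pvAProd]
  split_ifs <;> rfl

theorem pv_foldA_mono (F : List (String × String)) :
    ∀ d, (F.foldl (fun st q => pvAProd st q.1 q.2) (d, true)).2 = true := by
  induction F with
  | nil => intro d; rfl
  | cons q R ih =>
    intro d
    simp only [List.foldl_cons]
    have h : pvAProd (d, true) q.1 q.2 = ((pvAProd (d, true) q.1 q.2).1, true) :=
      Prod.ext rfl (pv_flag_mono d q.1 q.2)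
    rw [h]
    exact ih _

-- a step that reports no update stores no element (it can only create fresh keys)
theorem pv_step_flag_false (d : PySem.Dict String (PySem.Set String)) (u : Bool)
    (nt prod : String) (h : (pvAProd (d, u) nt prod).2 = false) :
    ∀ k, (pvAProd (d, u) nt prod).1.getD k PySem.Set.empty = d.getD k PySem.Set.empty := by
  set c := PySem.List.pyGetD prod.toList (-1) ' ' with hc
  set bS := String.ofList [c] with hb
  by_cases hup : PySem.Chars.isupper c = true
  · set d1 := (d.setdefault nt PySem.Set.empty).setdefault bS PySem.Set.empty with hd1
    set sA := d1.getD nt PySem.Set.empty with hsA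
    set sB := d1.getD bS PySem.Set.empty with hsB
    have hgd1 : ∀ k, d1.getD k PySem.Set.empty = d.getD k PySem.Set.empty := by
      intro k
      rw [hd1, pv_getD_setdefault, pv_getD_setdefault]
    by_cases hsup : PySem.Set.issuperset sA sB = true
    · have hdu : (if ¬ PySem.Set.issuperset sA sB = true
          then (d1.insert nt (PySem.Set.update sA sB), true) else (d1, u)) = (d1, u) :=
        if_neg (by simp [hsup])
      by_cases hP : (1 < prod.toList.length ∧
          ¬ PySem.Chars.isupper (PySem.List.pyGetD prod.toList (-2) ' ') = true)
      · set t := String.ofList [PySem.List.pyGetD prod.toList (-2) ' '] with ht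
        by_cases hmem : PySem.Set.contains
            ((d1.setdefault nt PySem.Set.empty).getD nt PySem.Set.empty) t = true
        · have hstep : pvAProd (d, u) nt prod = (d1.setdefault nt PySem.Set.empty, u) := by
            rw [pvAProd]
            simp only [← hc, ← hb, ← hd1, ← hsA, ← hsB]
            rw [if_neg (by simp [hup]), if_pos hP]
            simp only [← ht, hdu]
            rw [if_pos hmem]
          rw [hstep]
          intro k
          rw [pv_getD_setdefault]
          exact hgd1 k
        · exfalso
          have hstep : (pvAProd (d, u) nt prod).2 = true := by
            rw [pvAProd]
            simp only [← hc, ← hb, ← hd1, ← hsA, ← hsB]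
            rw [if_neg (by simp [hup]), if_pos hP]
            simp only [← ht, hdu]
            rw [if_neg hmem]
          rw [hstep] at h
          simp at h
      · have hstep : pvAProd (d, u) nt prod = (d1, u) := by
          rw [pvAProd]
          simp only [← hc, ← hb, ← hd1, ← hsA, ← hsB]
          rw [if_neg (by simp [hup]), if_neg hP]
          exact hdu
        rw [hstep]
        exact hgd1
    · exfalso
      have hdu : (if ¬ PySem.Set.issuperset sA sB = true
          then (d1.insert nt (PySem.Set.update sA sB), true) else (d1, u))
          = (d1.insert nt (PySem.Set.update sA sB), true) := if_pos (by simp [hsup])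
      by_cases hP : (1 < prod.toList.length ∧
          ¬ PySem.Chars.isupper (PySem.List.pyGetD prod.toList (-2) ' ') = true)
      · set t := String.ofList [PySem.List.pyGetD prod.toList (-2) ' '] with ht
        set d3 := d1.insert nt (PySem.Set.update sA sB) with hd3
        by_cases hmem : PySem.Set.contains
            ((d3.setdefault nt PySem.Set.empty).getD nt PySem.Set.empty) t = true
        · have hstep : (pvAProd (d, u) nt prod).2 = true := by
            rw [pvAProd]
            simp only [← hc, ← hb, ← hd1, ← hsA, ← hsB]
            rw [if_neg (by simp [hup]), if_pos hP]
            simp only [← ht, hdu, ← hd3]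
            rw [if_pos hmem]
          rw [hstep] at h
          simp at h
        · have hstep : (pvAProd (d, u) nt prod).2 = true := by
            rw [pvAProd]
            simp only [← hc, ← hb, ← hd1, ← hsA, ← hsB]
            rw [if_neg (by simp [hup]), if_pos hP]
            simp only [← ht, hdu, ← hd3]
            rw [if_neg hmem]
          rw [hstep] at h
          simp at h
      · have hstep : (pvAProd (d, u) nt prod).2 = true := by
          rw [pvAProd]
          simp only [← hc, ← hb, ← hd1, ← hsA, ← hsB]
          rw [if_neg (by simp [hup]), if_neg hP]
          rw [hdu]
        rw [hstep] at h
        simp at h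
  · set d1 := d.setdefault nt PySem.Set.empty with hd1
    by_cases hmem : PySem.Set.contains (d1.getD nt PySem.Set.empty) bS = true
    · have hstep : pvAProd (d, u) nt prod = (d1, u) := by
        rw [pvAProd]
        simp only [← hc, ← hb, ← hd1]
        rw [if_pos (by simp [hup]), if_pos hmem]
      rw [hstep]
      intro k
      rw [hd1, pv_getD_setdefault]
    · exfalso
      have hstep : (pvAProd (d, u) nt prod).2 = true := by
        rw [pvAProd]
        simp only [← hc, ← hb, ← hd1]
        rw [if_pos (by simp [hup]), if_neg hmem]
      rw [hstep] at h
      simp at h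

theorem pv_foldA_flag_false (F : List (String × String)) :
    ∀ d u, (F.foldl (fun st q => pvAProd st q.1 q.2) (d, u)).2 = false →
      u = false ∧ ∀ k, (F.foldl (fun st q => pvAProd st q.1 q.2) (d, u)).1.getD k PySem.Set.empty
        = d.getD k PySem.Set.empty := by
  induction F with
  | nil => intro d u h; exact ⟨h, fun _ => rfl⟩
  | cons q R ih =>
    intro d u h
    simp only [List.foldl_cons] at h ⊢
    by_cases h1 : (pvAProd (d, u) q.1 q.2).2 = true
    · have hrw : pvAProd (d, u) q.1 q.2 = ((pvAProd (d, u) q.1 q.2).1, true) :=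
        Prod.ext rfl h1
      rw [hrw, pv_foldA_mono R _] at h
      exact absurd h (by simp)
    · have h1' : (pvAProd (d, u) q.1 q.2).2 = false := by
        cases hv : (pvAProd (d, u) q.1 q.2).2
        · rfl
        · exact absurd hv h1
      have hu : u = false := by
        cases u
        · rfl
        · exact absurd (pv_flag_mono d q.1 q.2) (by rw [h1']; simp)
      have hgd := pv_step_flag_false d u q.1 q.2 h1'
      have hrw : pvAProd (d, u) q.1 q.2 = ((pvAProd (d, u) q.1 q.2).1, u) :=
        Prod.ext rfl (by rw [h1', hu])
      rw [hrw] at h ⊢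
      obtain ⟨hu2, hgd2⟩ := ih _ u h
      exact ⟨hu, fun k => (hgd2 k).trans (hgd k)⟩

-- ===== B's loop is inert when every edge is already propagated =====
theorem pv_epass_skip :
    ∀ (es : List (String × String × Nat)) (d : PySem.Dict String (PySem.Set String))
      (acc : List (String × String × Nat)) (u : Bool),
      (∀ e ∈ es, (d.getD e.2.1 PySem.Set.empty).length = e.2.2) →
      es.foldl pvEStep (d, acc, u) = (d, acc ++ es, u) := by
  intro es
  induction es with
  | nil => intro d acc u _; simp
  | cons e t ih =>
    intro d acc u h
    have hstep : pvEStep (d, acc, u) e = (d, acc ++ [e], u) := by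
      rw [pvEStep]
      rw [if_pos (h e List.mem_cons_self)]
    simp only [List.foldl_cons, hstep]
    rw [ih d (acc ++ [e]) u (fun e' he' => h e' (List.mem_cons_of_mem _ he'))]
    simp

theorem pv_bloop_skip (es : List (String × String × Nat))
    (d : PySem.Dict String (PySem.Set String))
    (h : ∀ e ∈ es, (d.getD e.2.1 PySem.Set.empty).length = e.2.2) :
    ∀ m, pvBLoop m es d = d := by
  intro m
  cases m with
  | zero => rfl
  | succ k =>
    rw [pvBLoop]
    rw [pv_epass_skip es d [] false h]
    simp

-- ===== the two fixed-point loops agree =====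
theorem pv_loop (g : List (String × List String)) :
    ∀ (m : Nat) (es : List (String × String × Nat)) (d : PySem.Dict String (PySem.Set String)),
      d.keys.Nodup → pvRInv (pvFlat g) d → pvEInv d es → pvMatch (pvFlat g) es →
      pvALoop g m d = pvBLoop m es d := by
  intro m
  induction m with
  | zero => intro es d _ _ _ _; rfl
  | succ k ih =>
    intro es d hn hR hE hM
    rw [pvALoop, pvBLoop]
    rw [pv_foldl_flat pvAProd g (d, false)]
    obtain ⟨esN, hfold, hM', hg, hn', hE'⟩ := pv_pass (pvFlat g) es d false [] hn hR hE hM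
    rw [hfold]
    simp only [List.nil_append]
    cases hst : ((pvFlat g).foldl (fun st q => pvAProd st q.1 q.2) (d, false)).2
    · simp only [if_false, Bool.false_eq_true]
    · simp only [if_true]
      exact ih esN _ hn' (pvRInv_grow hR hg) hE' hM'

-- ===== VERDICT (by name: the statement is the Claim_ definition above) =====
theorem compute_trailing_spec : Claim_equal_compute_trailing := by
  intro g _ _
  show (pvALoop g (pvFuel g + 1) PySem.Dict.empty).items = compute_trailing_alt g
  rw [compute_trailing_alt]
  rw [pv_foldl_flat pvBuildStep g (PySem.Dict.empty, [])]
  obtain ⟨heq, hn1, hg1, hR1, esN, hesN, hM, hE⟩ :=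
    pv_build_fold (pvFlat g) PySem.Dict.empty [] false PySem.Dict.nodup_keys_empty
      (fun e he => absurd he List.not_mem_nil)
  rw [pvALoop]
  rw [pv_foldl_flat pvAProd g (PySem.Dict.empty, false)]
  rw [hesN]
  simp only [List.nil_append]
  cases hst : ((pvFlat g).foldl (fun st q => pvAProd st q.1 q.2) (PySem.Dict.empty, false)).2
  · -- the very first pass already changed nothing: no trailing set has gained an element,
    -- so B's propagation loop skips every edge
    simp only [if_false, Bool.false_eq_true]
    obtain ⟨-, hgd⟩ := pv_foldA_flag_false (pvFlat g) PySem.Dict.empty false hst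
    have hskip : ∀ e ∈ esN,
        (((pvFlat g).foldl (fun st q => pvBuildStep st q.1 q.2)
          (PySem.Dict.empty, [])).1.getD e.2.1 PySem.Set.empty).length = e.2.2 := by
      intro e he
      have h1 := (hE e he).2.2.1
      have h0 : ((pvFlat g).foldl (fun st q => pvBuildStep st q.1 q.2)
          (PySem.Dict.empty, [])).1.getD e.2.1 PySem.Set.empty = PySem.Set.empty := by
        rw [← heq]
        rw [hgd e.2.1]
        exact PySem.Dict.getD_empty _ _
      rw [h0] at h1 ⊢
      simpa using (Nat.le_zero.mp h1).symm
    rw [pv_bloop_skip esN _ hskip (pvFuel g)]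
    rw [heq]
  · simp only [if_true]
    rw [heq]
    exact congrArg _ (pv_loop g (pvFuel g) esN _ hn1 hR1 hE hM)
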